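-- pv_equiv track=rewrite | github.com/JK0201/Algorithm | 백준/Silver/9095. 1， 2， 3 더하기/1， 2， 3 더하기.py | dfs
-- ===== SOURCE A (Python) =====
-- memo = {}
--
-- def dfs(n):
--     if n == 0 or n == 1:
--         return 1
--
--     if n == 2:
--         return 2
--
--     if n not in memo:
--         memo[n] = dfs(n-1) + dfs(n-2) + dfs(n-3)
--
--     return memo[n]
-- ===== SOURCE B (Python) =====
-- def dfs(n):
--     if n == 0 or n == 1:
--         return 1
--     if n == 2:
--         return 2
--     a, b, c = 1, 1, 2
--     for _ in range(n - 2):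
--         a, b, c = b, c, a + b + c
--     return c
-- ===== Notes on version B (the rewrite author's own statement) =====
-- stated objective: alternative
-- what changed: Replaces the memoized top-down recursion with a single forward loop rolling three running values, removing recursion and the global memo dict (O(1) extra space, no RecursionError depth limit).
import Mathlib
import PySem

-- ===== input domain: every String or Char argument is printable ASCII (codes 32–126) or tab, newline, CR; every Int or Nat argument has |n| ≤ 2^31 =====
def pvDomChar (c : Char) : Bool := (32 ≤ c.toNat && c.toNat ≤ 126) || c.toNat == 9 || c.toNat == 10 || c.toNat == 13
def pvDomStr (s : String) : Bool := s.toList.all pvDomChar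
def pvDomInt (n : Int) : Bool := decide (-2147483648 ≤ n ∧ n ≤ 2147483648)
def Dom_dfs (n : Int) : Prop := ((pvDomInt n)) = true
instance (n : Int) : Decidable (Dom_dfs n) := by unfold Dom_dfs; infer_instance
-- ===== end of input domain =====

-- B replaces A's memoized top-down recursion by a single forward loop over three
-- running values (same recurrence, iterative bottom-up decomposition).
-- A's memo is a module-level global persisting across calls; it only caches values
-- of this fixed recurrence and never changes the returned value, so the port runs
-- each call with its own fresh memo (return-value equivalence only).


-- ===== PORT A =====
-- Recursion with the memo dict threaded through, step for step as in A.
-- The 'n < 0' guard is for termination only: there the Python A recurses forever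
-- (RecursionError), outside Pre_dfs.
def dfsMemo (n : Int) (memo : PySem.Dict Int Int) : Int × PySem.Dict Int Int :=
  if n = 0 ∨ n = 1 then (1, memo)
  else if n = 2 then (2, memo)
  else if n < 0 then (0, memo)
  else
    match memo.get? n with                       -- 'if n not in memo'
    | some v => (v, memo)                        -- 'return memo[n]' (cached)
    | none =>
      let r1 := dfsMemo (n - 1) memo
      let r2 := dfsMemo (n - 2) r1.2
      let r3 := dfsMemo (n - 3) r2.2
      let m4 := r3.2.insert n (r1.1 + r2.1 + r3.1)   -- 'memo[n] = dfs(n-1)+dfs(n-2)+dfs(n-3)'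
      (m4.getD n 0, m4)                          -- 'return memo[n]'
termination_by n.toNat
decreasing_by all_goals omega

def dfs (n : Int) : Int := (dfsMemo n PySem.Dict.empty).1

-- ===== PORT B =====
def dfs_alt (n : Int) : Int :=
  if n = 0 ∨ n = 1 then 1
  else if n = 2 then 2
  else
    ((PySem.List.pyRange 0 (n - 2) 1).foldl
      (fun (t : Int × Int × Int) _ => (t.2.1, t.2.2, t.1 + t.2.1 + t.2.2))
      (1, 1, 2)).2.2

-- ===== PRECONDITION & SPEC =====
-- Pre_dfs excludes negative n, on which the Python A recurses without ever
-- reaching a base case and raises RecursionError.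
def Pre_dfs (n : Int) : Prop := 0 ≤ n
instance (n : Int) : Decidable (Pre_dfs n) := by unfold Pre_dfs; infer_instance
def pvWitness_dfs : Int := (7)

def Spec_dfs (n : Int) (out : Int) : Prop := out = dfs_alt n
instance (n : Int) (out : Int) : Decidable (Spec_dfs n out) := by unfold Spec_dfs; infer_instance

-- ===== CLAIM =====
def Claim_equal_dfs : Prop := ∀ (n : Int), Dom_dfs n → Pre_dfs n → Spec_dfs n (dfs n)

-- ===== LEMMAS AND PROOFS =====

-- Memo-free statement of A's recurrence, used only in the proofs.
def dfsPure (n : Int) : Int :=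
  if n = 0 ∨ n = 1 then 1
  else if n = 2 then 2
  else if n < 0 then 0
  else dfsPure (n - 1) + dfsPure (n - 2) + dfsPure (n - 3)
termination_by n.toNat
decreasing_by all_goals omega

theorem dfsPure_rec (n : Int) (h : 3 ≤ n) :
    dfsPure n = dfsPure (n - 1) + dfsPure (n - 2) + dfsPure (n - 3) := by
  rw [dfsPure]
  have h0 : ¬(n = 0 ∨ n = 1) := by omega
  have h2 : ¬(n = 2) := by omega
  have h3 : ¬(n < 0) := by omega
  simp [h0, h2, h3]

-- the memo only ever holds correct values of the recurrence
def GoodMemo (m : PySem.Dict Int Int) : Prop :=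
  ∀ k v, m.get? k = some v → v = dfsPure k

theorem dfsMemo_good : ∀ (N : Nat) (n : Int) (m : PySem.Dict Int Int),
    n.toNat ≤ N → GoodMemo m →
    (dfsMemo n m).1 = dfsPure n ∧ GoodMemo (dfsMemo n m).2 := by
  intro N
  induction N with
  | zero =>
      intro n m hn hg
      rw [dfsMemo]
      have : n = 0 ∨ n < 0 := by omega
      rcases this with h | h
      · rw [if_pos (Or.inl h)]
        have hp : dfsPure n = 1 := by rw [dfsPure, if_pos (Or.inl h)]
        exact ⟨hp.symm, hg⟩
      · have h0 : ¬(n = 0 ∨ n = 1) := by omega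
        have h2 : ¬(n = 2) := by omega
        rw [if_neg h0, if_neg h2, if_pos h]
        have hp : dfsPure n = 0 := by rw [dfsPure, if_neg h0, if_neg h2, if_pos h]
        exact ⟨hp.symm, hg⟩
  | succ N ih =>
      intro n m hn hg
      rw [dfsMemo]
      by_cases h0 : n = 0 ∨ n = 1
      · rw [if_pos h0]
        have hp : dfsPure n = 1 := by rw [dfsPure, if_pos h0]
        exact ⟨hp.symm, hg⟩
      · by_cases h2 : n = 2
        · rw [if_neg h0, if_pos h2]
          have hp : dfsPure n = 2 := by rw [dfsPure, if_neg h0, if_pos h2]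
          exact ⟨hp.symm, hg⟩
        · by_cases hneg : n < 0
          · rw [if_neg h0, if_neg h2, if_pos hneg]
            have hp : dfsPure n = 0 := by rw [dfsPure, if_neg h0, if_neg h2, if_pos hneg]
            exact ⟨hp.symm, hg⟩
          · have h3 : 3 ≤ n := by omega
            rw [if_neg h0, if_neg h2, if_neg hneg]
            cases hget : m.get? n with
            | some v => exact ⟨hg n v hget, hg⟩
            | none =>

                have t1 : (n - 1).toNat ≤ N := by omega
                have t2 : (n - 2).toNat ≤ N := by omega
                have t3 : (n - 3).toNat ≤ N := by omega
                obtain ⟨e1, g1⟩ := ih (n - 1) m t1 hg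
                obtain ⟨e2, g2⟩ := ih (n - 2) (dfsMemo (n - 1) m).2 t2 g1
                obtain ⟨e3, g3⟩ := ih (n - 3) (dfsMemo (n - 2) (dfsMemo (n - 1) m).2).2 t3 g2
                simp only []
                set s := (dfsMemo (n - 1) m).1 + (dfsMemo (n - 2) (dfsMemo (n - 1) m).2).1
                    + (dfsMemo (n - 3) (dfsMemo (n - 2) (dfsMemo (n - 1) m).2).2).1 with hs
                have hsum : s = dfsPure n := by
                  rw [hs, e1, e2, e3, ← dfsPure_rec n h3]
                constructor
                · rw [PySem.Dict.getD_insert_self]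
                  exact hsum
                · intro k v hkv
                  rw [PySem.Dict.get?_insert] at hkv
                  split_ifs at hkv with hk
                  · subst hk
                    injection hkv with hv
                    omega
                  · exact g3 k v hkv

theorem dfs_eq_pure (n : Int) : dfs n = dfsPure n := by
  have := dfsMemo_good n.toNat n PySem.Dict.empty (le_refl _)
    (by intro k v h; simp [PySem.Dict.get?_empty] at h)
  exact this.1

theorem dfs_loop_inv (k : Nat) :
    ((PySem.List.pyRange 0 (k : Int) 1).foldl
      (fun (t : Int × Int × Int) _ => (t.2.1, t.2.2, t.1 + t.2.1 + t.2.2))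
      (1, 1, 2)) = (dfsPure k, dfsPure (k + 1), dfsPure (k + 2)) := by
  have d0 : dfsPure 0 = 1 := by rw [dfsPure]; norm_num
  have d1 : dfsPure 1 = 1 := by rw [dfsPure]; norm_num
  have d2 : dfsPure 2 = 2 := by rw [dfsPure]; norm_num
  induction k with
  | zero =>
      rw [PySem.List.pyRange_one_eq_nil (by omega)]
      simp [d0, d1, d2]
  | succ m ih =>
      push_cast
      rw [PySem.List.pyRange_one_succ_right (by positivity), List.foldl_append, ih]
      simp only [List.foldl_cons, List.foldl_nil]
      have h3 : dfsPure ((m : Int) + 3) = dfsPure ((m : Int) + 2) + dfsPure ((m : Int) + 1) + dfsPure (m : Int) := by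
        have := dfsPure_rec ((m : Int) + 3) (by omega)
        have e1 : (m : Int) + 3 - 1 = (m : Int) + 2 := by ring
        have e2 : (m : Int) + 3 - 2 = (m : Int) + 1 := by ring
        have e3 : (m : Int) + 3 - 3 = (m : Int) := by ring
        rw [e1, e2, e3] at this
        exact this
      have e1 : (m : Int) + 1 + 1 = (m : Int) + 2 := by ring
      have e2 : (m : Int) + 1 + 2 = (m : Int) + 3 := by ring
      simp only [e1, e2, h3]
      exact Prod.ext rfl (Prod.ext rfl (by ring))

-- ===== VERDICT =====
theorem dfs_spec : Claim_equal_dfs := by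
  intro n _ hpre
  unfold Spec_dfs dfs_alt
  rw [dfs_eq_pure]
  by_cases h01 : n = 0 ∨ n = 1
  · rcases h01 with h | h <;> subst h <;> rw [dfsPure] <;> norm_num
  · by_cases h2 : n = 2
    · subst h2; rw [dfsPure]; norm_num
    · have h3 : 3 ≤ n := by unfold Pre_dfs at hpre; omega
      simp only [h01, h2, if_false]
      have hk : (n - 2) = ((n - 2).toNat : Int) := by omega
      rw [hk, dfs_loop_inv]
      have : ((n - 2).toNat : Int) + 2 = n := by omega
      rw [this]
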